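-- pv_equiv track=rewrite | github.com/monotera/PyScriptHub | random/nonogram_solver/main.py | findBaseElements
-- ===== SOURCE A (Python) =====
-- def findBaseElements(board, gameBoard, tam):
--     parY = board["parametrosX"]
--     parX = board["parametrosY"]
--
--     baseY = []
--     baseX = []
--
--     for i in range(tam):
--         sumY = 0
--         sumX = 0
--         for j in range(len(parY[i])):
--             sumY += parY[i][j]
--             if len(parY[i]) - 1 > j:
--                 sumY += 1
--
--         for j in range(len(parX[i])):
--             sumX += parX[i][j]
--             if len(parX[i]) - 1 > j:
--                 sumX += 1
--
--         if sumY == tam: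
--             baseY.append(i)
--
--         if sumX == tam:
--             baseX.append(i)
--
--     return baseY, baseX
-- ===== SOURCE B (Python) =====
-- def findBaseElements(board, gameBoard, tam):
--     parY = board["parametrosX"]
--     parX = board["parametrosY"]
--
--     def collect(rows, i):
--         # A clue list exactly fills the board iff each value plus its trailing
--         # gap, i.e. sum(v + 1 for v in rows[0]), equals tam + 1.
--         if i >= tam or not rows:
--             return []
--         head, rest = rows[0], rows[1:]
--         tail = collect(rest, i + 1)
--         w = 0
--         for v in head:
--             w += v + 1
--         return [i] + tail if w == tam + 1 else tail
--
--     return collect(parY, 0), collect(parX, 0)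
-- ===== Notes on version B (the rewrite author's own statement) =====
-- stated objective: alternative
-- what changed: B replaces A's index loop with interleaved running sums (value plus a conditional per-step gap increment) by a structural recursion over the clue lists that builds the result back-to-front and tests each clue with the shifted weight sum(v+1 for v in clue) == tam+1.
import Mathlib
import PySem

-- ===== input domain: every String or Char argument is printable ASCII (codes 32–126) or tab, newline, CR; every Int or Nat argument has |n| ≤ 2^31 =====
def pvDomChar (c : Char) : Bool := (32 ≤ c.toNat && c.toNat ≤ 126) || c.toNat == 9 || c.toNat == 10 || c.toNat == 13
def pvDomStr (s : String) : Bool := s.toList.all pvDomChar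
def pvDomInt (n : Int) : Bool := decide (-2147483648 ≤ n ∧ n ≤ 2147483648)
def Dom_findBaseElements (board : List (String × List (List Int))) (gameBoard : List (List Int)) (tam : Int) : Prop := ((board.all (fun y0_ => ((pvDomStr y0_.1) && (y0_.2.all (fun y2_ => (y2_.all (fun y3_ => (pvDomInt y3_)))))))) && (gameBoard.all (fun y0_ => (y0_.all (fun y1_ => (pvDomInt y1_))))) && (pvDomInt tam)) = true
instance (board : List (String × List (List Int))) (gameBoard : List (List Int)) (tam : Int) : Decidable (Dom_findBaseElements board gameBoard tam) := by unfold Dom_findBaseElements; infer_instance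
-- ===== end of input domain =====

-- B replaces A's index loop with interleaved running sums by a structural recursion over the
-- clue lists, built back-to-front, testing each clue with sum(v+1) == tam+1; same cost.
-- ===== PORT A =====
def findBaseElements (board : List (String × List (List Int))) (gameBoard : List (List Int)) (tam : Int) : List Int × List Int :=
  let parY := (board.lookup "parametrosX").getD []
  let parX := (board.lookup "parametrosY").getD []
  (PySem.List.pyRange 0 tam 1).foldl (fun (acc : List Int × List Int) i =>
    let rowY := PySem.List.pyGetD parY i []
    let rowX := PySem.List.pyGetD parX i []
    let sumY := (PySem.List.pyRange 0 (rowY.length : Int) 1).foldl (fun s j =>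
        let s' := s + PySem.List.pyGetD rowY j 0
        if (rowY.length : Int) - 1 > j then s' + 1 else s') 0
    let sumX := (PySem.List.pyRange 0 (rowX.length : Int) 1).foldl (fun s j =>
        let s' := s + PySem.List.pyGetD rowX j 0
        if (rowX.length : Int) - 1 > j then s' + 1 else s') 0
    let acc1 := if sumY = tam then (acc.1 ++ [i], acc.2) else acc
    if sumX = tam then (acc1.1, acc1.2 ++ [i]) else acc1) ([], [])

-- ===== PORT B =====
-- Source B's inner weight loop: w = 0; for v in head: w += v + 1
def pvWeight (clue : List Int) : Int := clue.foldl (fun w v => w + (v + 1)) 0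

-- Source B's recursive collect(rows, i)
def pvCollect (tam : Int) (rows : List (List Int)) (i : Int) : List Int :=
  if tam ≤ i then [] else
  match rows with
  | [] => []
  | head :: rest =>
    let tail := pvCollect tam rest (i + 1)
    if pvWeight head = tam + 1 then i :: tail else tail

def findBaseElements_alt (board : List (String × List (List Int))) (gameBoard : List (List Int)) (tam : Int) : List Int × List Int :=
  let parY := (board.lookup "parametrosX").getD []
  let parX := (board.lookup "parametrosY").getD []
  (pvCollect tam parY 0, pvCollect tam parX 0)

-- ===== PRECONDITION & SPEC =====
-- Pre_ excludes exactly the inputs where Python A raises: a missing "parametrosX"/"parametrosY"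
-- key (KeyError) or tam exceeding the length of either clue list (IndexError).
def Pre_findBaseElements (board : List (String × List (List Int))) (gameBoard : List (List Int)) (tam : Int) : Prop :=
  (board.lookup "parametrosX").isSome = true ∧ (board.lookup "parametrosY").isSome = true ∧
  tam ≤ (((board.lookup "parametrosX").getD []).length : Int) ∧
  tam ≤ (((board.lookup "parametrosY").getD []).length : Int)
instance (board : List (String × List (List Int))) (gameBoard : List (List Int)) (tam : Int) : Decidable (Pre_findBaseElements board gameBoard tam) := by unfold Pre_findBaseElements; infer_instance

def pvWitness_findBaseElements : (List (String × List (List Int))) × List (List Int) × Int :=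
  ([("parametrosX", [[1]]), ("parametrosY", [[1]])], [[0]], 1)

def Spec_findBaseElements (board : List (String × List (List Int))) (gameBoard : List (List Int)) (tam : Int) (out : List Int × List Int) : Prop := out = findBaseElements_alt board gameBoard tam
instance (board : List (String × List (List Int))) (gameBoard : List (List Int)) (tam : Int) (out : List Int × List Int) : Decidable (Spec_findBaseElements board gameBoard tam out) := by unfold Spec_findBaseElements; infer_instance

-- ===== CLAIM (what is proved, stated in full; the proofs are below) =====
def Claim_equal_findBaseElements : Prop := ∀ (board : List (String × List (List Int))) (gameBoard : List (List Int)) (tam : Int), Dom_findBaseElements board gameBoard tam → Pre_findBaseElements board gameBoard tam → Spec_findBaseElements board gameBoard tam (findBaseElements board gameBoard tam)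

-- ===== LEMMAS AND PROOFS =====

-- A's closed fill size for a clue list: sum plus len-1 gaps.
def pvFull (clue : List Int) : Int := clue.sum + max ((clue.length : Int) - 1) 0

-- A's inner running-sum loop over a clue list equals the closed form pvFull.
lemma inner_eq_pvFull (row : List Int) :
    (PySem.List.pyRange 0 (row.length : Int) 1).foldl (fun s j =>
        let s' := s + PySem.List.pyGetD row j 0
        if (row.length : Int) - 1 > j then s' + 1 else s') 0 = pvFull row := by
  have hbody : (fun (s j : Int) =>
      let s' := s + PySem.List.pyGetD row j 0
      if (row.length : Int) - 1 > j then s' + 1 else s')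
      = fun s j => s + (PySem.List.pyGetD row j 0 + (if (row.length : Int) - 1 > j then (1:Int) else 0)) := by
    funext s j
    by_cases h : (row.length : Int) - 1 > j <;> simp [h] <;> ring
  rw [hbody, PySem.List.foldl_add, PySem.List.sum_map_add_int,
      PySem.List.map_pyGetD_pyRange_zero']
  have hdec : (fun (j : Int) => if (row.length : Int) - 1 > j then (1:Int) else 0)
      = fun j => if (decide ((row.length : Int) - 1 > j)) = true then (1:Int) else 0 := by
    funext j; simp
  rw [hdec, PySem.List.sum_map_ite_one_zero]
  have hc : (PySem.List.pyRange 0 (row.length : Int) 1).countP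
      (fun j => decide ((row.length : Int) - 1 > j)) = row.length - 1 := by
    cases hn : row.length with
    | zero => simp
    | succ m =>
      have hsplit : PySem.List.pyRange 0 ((m : Int) + 1) 1
          = PySem.List.pyRange 0 (m : Int) 1 ++ [(m : Int)] :=
        PySem.List.pyRange_one_succ_right (by positivity)
      have : ((m + 1 : Nat) : Int) = (m : Int) + 1 := by push_cast; ring
      rw [this, hsplit, List.countP_append]
      have h1 : (PySem.List.pyRange 0 (m : Int) 1).countP
          (fun j => decide ((m : Int) + 1 - 1 > j)) = m := by
        rw [List.countP_eq_length.mpr]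
        · simp [PySem.List.length_pyRange_one]
        · intro j hj
          have := (PySem.List.mem_pyRange_one).1 hj
          simp; omega
      rw [h1]
      simp
  rw [hc]
  unfold pvFull
  cases hn : row.length <;> push_cast [hn] <;> omega

-- B's weight loop is sum + length.
lemma pvWeight_eq_aux (r : List Int) : ∀ init : Int,
    r.foldl (fun w v => w + (v + 1)) init = init + r.sum + r.length := by
  induction r with
  | nil => intro init; simp
  | cons h t ih => intro init; simp [List.foldl, ih]; push_cast; ring

lemma pvWeight_eq (r : List Int) : pvWeight r = r.sum + r.length := by
  simpa using pvWeight_eq_aux r 0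

-- For tam ≥ 1 the two tests agree on every clue list.
lemma test_iff (r : List Int) (tam : Int) (h : 1 ≤ tam) :
    (pvFull r = tam) ↔ (pvWeight r = tam + 1) := by
  rw [pvWeight_eq]
  unfold pvFull
  cases hn : r.length with
  | zero =>
    have hr : r = [] := List.eq_nil_of_length_eq_zero hn
    subst hr; simp; omega
  | succ m => push_cast [hn]; omega

-- B's recursion computes the filtered range, given tam ≤ length of the remaining rows' source.
lemma collect_eq (tam : Int) (full : List (List Int)) (ht : tam ≤ (full.length : Int)) :
    ∀ (s : Nat), pvCollect tam (full.drop s) s =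
      (PySem.List.pyRange s tam 1).filter
        (fun i => decide (pvWeight (PySem.List.pyGetD full i []) = tam + 1)) := by
  intro s
  by_cases hlt : (s : Int) < tam
  · -- need strong induction on tam.toNat - s
    have hkey : ∀ (n : Nat) (s : Nat), (tam.toNat - s ≤ n) →
        pvCollect tam (full.drop s) s =
        (PySem.List.pyRange s tam 1).filter
          (fun i => decide (pvWeight (PySem.List.pyGetD full i []) = tam + 1)) := by
      intro n
      induction n with
      | zero =>
        intro s hs
        have hts : tam ≤ (s : Int) := by omega
        rw [PySem.List.pyRange_one_eq_nil hts]
        unfold pvCollect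
        split
        · rfl
        · omega
      | succ n ih =>
        intro s hs
        by_cases hlt' : (s : Int) < tam
        · have hslen : s < full.length := by omega
          have hdrop : full.drop s = full[s] :: full.drop (s + 1) :=
            List.drop_eq_getElem_cons hslen
          rw [hdrop]
          unfold pvCollect
          rw [if_neg (by omega)]
          simp only []
          rw [PySem.List.pyRange_one_cons hlt']
          have hget : PySem.List.pyGetD full (s : Int) [] = full[s] := by
            rw [PySem.List.pyGetD_natCast]
            exact List.getD_eq_getElem full [] hslen
          have hrec : pvCollect tam (full.drop (s + 1)) ((s : Int) + 1) =
              (PySem.List.pyRange ((s : Int) + 1) tam 1).filter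
                (fun i => decide (pvWeight (PySem.List.pyGetD full i []) = tam + 1)) := by
            have := ih (s + 1) (by omega)
            simpa [Nat.cast_add] using this
          rw [List.filter_cons, hget, hrec]
          by_cases hw : pvWeight full[s] = tam + 1 <;> simp [hw]
        · have hts : tam ≤ (s : Int) := by omega
          rw [PySem.List.pyRange_one_eq_nil hts]
          unfold pvCollect
          split
          · rfl
          · omega
    exact hkey (tam.toNat - s) s (le_refl _)
  · have hts : tam ≤ (s : Int) := by omega
    rw [PySem.List.pyRange_one_eq_nil hts]
    unfold pvCollect
    split
    · rfl
    · omega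

theorem findBaseElements_equiv (board : List (String × List (List Int))) (gameBoard : List (List Int)) (tam : Int)
    (hY : tam ≤ (((board.lookup "parametrosX").getD []).length : Int))
    (hX : tam ≤ (((board.lookup "parametrosY").getD []).length : Int)) :
    findBaseElements board gameBoard tam = findBaseElements_alt board gameBoard tam := by
  unfold findBaseElements findBaseElements_alt
  simp only [inner_eq_pvFull]
  set parY := (board.lookup "parametrosX").getD [] with hYdef
  set parX := (board.lookup "parametrosY").getD [] with hXdef
  have hstep : (fun (acc : List Int × List Int) (i : Int) =>
      let acc1 := if pvFull (PySem.List.pyGetD parY i []) = tam then (acc.1 ++ [i], acc.2) else acc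
      if pvFull (PySem.List.pyGetD parX i []) = tam then (acc1.1, acc1.2 ++ [i]) else acc1)
      = fun (acc : List Int × List Int) (i : Int) =>
        ((fun (a : List Int) (i : Int) => if pvFull (PySem.List.pyGetD parY i []) = tam then a ++ [i] else a) acc.1 i,
         (fun (a : List Int) (i : Int) => if pvFull (PySem.List.pyGetD parX i []) = tam then a ++ [i] else a) acc.2 i) := by
    funext acc i
    by_cases h1 : pvFull (PySem.List.pyGetD parY i []) = tam <;>
      by_cases h2 : pvFull (PySem.List.pyGetD parX i []) = tam <;> simp [h1, h2]
  rw [hstep, PySem.List.foldl_prod_mk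
        (f := fun (a : List Int) (i : Int) => if pvFull (PySem.List.pyGetD parY i []) = tam then a ++ [i] else a)
        (g := fun (a : List Int) (i : Int) => if pvFull (PySem.List.pyGetD parX i []) = tam then a ++ [i] else a),
      PySem.List.foldl_append_ite_eq_filter, PySem.List.foldl_append_ite_eq_filter]
  have hcong : ∀ (par : List (List Int)),
      (PySem.List.pyRange 0 tam 1).filter (fun i => decide (pvFull (PySem.List.pyGetD par i []) = tam))
      = (PySem.List.pyRange 0 tam 1).filter (fun i => decide (pvWeight (PySem.List.pyGetD par i []) = tam + 1)) := by
    intro par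
    apply List.filter_congr
    intro i hi
    have hmem := (PySem.List.mem_pyRange_one).1 hi
    have h1 : (1 : Int) ≤ tam := by omega
    simp [test_iff _ _ h1]
  have hA := collect_eq tam parY hY 0
  have hB := collect_eq tam parX hX 0
  simp only [Nat.cast_zero, List.drop_zero] at hA hB
  rw [hcong parY, hcong parX, ← hA, ← hB]
  simp

-- ===== VERDICT (by name: the statement is the Claim_ definition above) =====
theorem findBaseElements_spec : Claim_equal_findBaseElements := by
  intro board gameBoard tam _ hpre
  exact findBaseElements_equiv board gameBoard tam hpre.2.2.1 hpre.2.2.2
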